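-- pv_equiv track=rewrite | github.com/guaardvark/guaardvark | backend/utils/enhanced_rag_chunking.py | _split_css_sections
-- ===== SOURCE A (Python) =====
-- from typing import List, Dict, Optional, Any, Tuple
--
-- def _split_css_sections(content: str) -> List[str]:
--     """Split CSS by logical sections"""
--     # Split by major CSS blocks
--     import re
--
--     sections = []
--     current_section = []
--     lines = content.split('\n')
--
--     for line in lines:
--         stripped = line.strip()
--
--         # Start new section on top-level selectors (not nested)
--         if (stripped and not stripped.startswith(('@', '/*', '*/', '}')) and
--             '{' in stripped and not line.startswith(' ')):
--
--             if current_section: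
--                 sections.append('\n'.join(current_section))
--                 current_section = []
--
--         current_section.append(line)
--
--     if current_section:
--         sections.append('\n'.join(current_section))
--
--     return sections
-- ===== SOURCE B (Python) =====
-- from typing import List
--
-- def _split_css_sections(content: str) -> List[str]:
--     """Split CSS by logical sections (boundary-indices then partition)."""
--     lines = content.split('\n')
--
--     def is_boundary(line: str) -> bool:
--         stripped = line.strip()
--         return (bool(stripped) and not stripped.startswith(('@', '/*', '*/', '}'))
--                 and '{' in stripped and not line.startswith(' '))
--
--     cuts = [i for i in range(1, len(lines)) if is_boundary(lines[i])]
--     bounds = [0] + cuts + [len(lines)]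
--     return ['\n'.join(lines[a:b]) for a, b in zip(bounds, bounds[1:])]
-- ===== Notes on version B (the rewrite author's own statement) =====
-- stated objective: alternative
-- what changed: Replaces A's accumulate-and-flush loop (mutable current_section flushed whenever a top-level selector line is met) by a two-phase split-points-then-partition structure: one pass collects the boundary line indices, then the line list is sliced at those indices and each slice joined.
import Mathlib
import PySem

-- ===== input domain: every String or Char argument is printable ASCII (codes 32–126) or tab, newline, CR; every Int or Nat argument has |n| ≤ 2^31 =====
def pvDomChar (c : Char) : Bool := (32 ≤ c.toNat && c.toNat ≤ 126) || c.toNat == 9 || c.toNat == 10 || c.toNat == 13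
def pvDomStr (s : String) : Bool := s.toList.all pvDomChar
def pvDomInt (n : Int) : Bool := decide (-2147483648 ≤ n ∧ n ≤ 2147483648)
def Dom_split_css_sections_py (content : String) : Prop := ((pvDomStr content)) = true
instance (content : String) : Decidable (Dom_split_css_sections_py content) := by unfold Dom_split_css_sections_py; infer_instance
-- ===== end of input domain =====

-- B replaces A's accumulate-and-flush loop by computing the boundary indices first and
-- slicing the line list at them (same cost; objective: alternative decomposition).

-- the top-level-selector test both Pythons perform on a line (B's is_boundary helper; inline in A)
def pvBoundary (line : String) : Bool :=
  let stripped := PySem.Str.strip line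
  !(stripped == "") &&
  !(PySem.Str.startswith stripped "@" || PySem.Str.startswith stripped "/*" ||
    PySem.Str.startswith stripped "*/" || PySem.Str.startswith stripped "}") &&
  PySem.Str.isIn "{" stripped && !(PySem.Str.startswith line " ")

-- ===== PORT A =====
def split_css_sections_py (content : String) : List String :=
  let lines := (PySem.Str.split? content "\n").getD [""]   -- sep "\n" ≠ "": split? is always some
  let st := lines.foldl (fun (st : List String × List String) line =>
    let st := if pvBoundary line then
        (if st.2 ≠ [] then (st.1 ++ [PySem.Str.join "\n" st.2], ([] : List String)) else st)
      else st
    (st.1, st.2 ++ [line])) (([], []) : List String × List String)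
  if st.2 ≠ [] then st.1 ++ [PySem.Str.join "\n" st.2] else st.1

-- ===== PORT B =====
def split_css_sections_py_alt (content : String) : List String :=
  let lines := (PySem.Str.split? content "\n").getD [""]   -- sep "\n" ≠ "": split? is always some
  let cuts := (PySem.List.pyRange 1 (lines.length) 1).filter
      (fun i => pvBoundary (PySem.List.pyGetD lines i ""))
  let bounds := (0 : Int) :: cuts ++ [(lines.length : Int)]
  (bounds.zip bounds.tail).map
    (fun ab => PySem.Str.join "\n" (PySem.List.slice lines (some ab.1) (some ab.2)))

-- ===== PRECONDITION & SPEC =====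
def Spec_split_css_sections_py (content : String) (out : List String) : Prop := out = split_css_sections_py_alt content
instance (content : String) (out : List String) : Decidable (Spec_split_css_sections_py content out) := by unfold Spec_split_css_sections_py; infer_instance

-- ===== CLAIM (what is proved, stated in full; the proofs are below) =====
def Claim_equal_split_css_sections_py : Prop := ∀ (content : String), Dom_split_css_sections_py content → Spec_split_css_sections_py content (split_css_sections_py content)

-- ===== LEMMAS AND PROOFS =====

-- the partition of cur ++ t that starts a new chunk before every boundary line of t
def pvChunks (cur : List String) : List String → List (List String)
  | [] => [cur]
  | x :: xs => if pvBoundary x then cur :: pvChunks [x] xs else pvChunks (cur ++ [x]) xs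

-- boundary indices of t (Nat form)
def pvCuts (t : List String) : List Nat :=
  (List.range t.length).filter (fun j => pvBoundary (t.getD j ""))

-- slices of l at consecutive Nat bounds
def pvScN (l : List String) : List Nat → List (List String)
  | a :: b :: r => (l.drop a).take (b - a) :: pvScN l (b :: r)
  | _ => []

theorem pvScN_cc (l : List String) (a b : Nat) (r : List Nat) :
    pvScN l (a :: b :: r) = (l.drop a).take (b - a) :: pvScN l (b :: r) := rfl

theorem pvScN_shift (cur l : List String) (bs : List Nat) :
    pvScN (cur ++ l) (bs.map (· + cur.length)) = pvScN l bs := by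
  induction bs with
  | nil => simp [pvScN]
  | cons a r ih =>
    cases r with
    | nil => simp [pvScN]
    | cons b r' =>
      simp only [List.map_cons, pvScN] at *
      rw [ih]
      congr 1
      rw [Nat.add_comm a cur.length, List.drop_append,
        List.drop_eq_nil_of_le (by omega), List.nil_append, Nat.add_sub_cancel_left]
      congr 1
      omega

theorem pvCuts_cons (x : String) (xs : List String) :
    pvCuts (x :: xs) =
      (if pvBoundary x then [0] else []) ++ (pvCuts xs).map (· + 1) := by
  simp only [pvCuts, List.length_cons, List.range_succ_eq_map, List.filter_cons,
    List.getD_cons_zero, List.filter_map, Function.comp_def, Nat.succ_eq_add_one,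
    List.getD_cons_succ]
  split_ifs with h <;> simp

theorem pvScN_core (t : List String) : ∀ cur : List String, cur ≠ [] →
    pvScN (cur ++ t) (0 :: (pvCuts t).map (· + cur.length) ++ [cur.length + t.length]) =
      pvChunks cur t := by
  induction t with
  | nil =>
    intro cur _
    simp [pvCuts, pvChunks, pvScN, List.take_of_length_le]
  | cons x xs ih =>
    intro cur hcur
    rw [pvCuts_cons]
    by_cases hx : pvBoundary x
    · simp only [hx, if_true, List.singleton_append, List.map_cons, List.map_append,
        List.map_map, List.map_nil, Nat.zero_add, List.length_cons, List.cons_append,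
        List.nil_append]
      have hlist : ((cur.length :: ((pvCuts xs).map ((· + cur.length) ∘ (· + 1)) ++ [cur.length + (xs.length + 1)])) : List Nat)
          = (0 :: (pvCuts xs).map (· + 1) ++ [1 + xs.length]).map (· + cur.length) := by
        simp only [List.map_cons, List.map_append, List.map_map, List.map_nil, Nat.zero_add,
          List.cons_append]
        refine congrArg₂ _ rfl (congrArg₂ _ ?_ ?_)
        · apply List.map_congr_left; intro a _; simp [Function.comp_def]
        · simp [Nat.add_comm]
      rw [pvScN_cc, hlist]
      rw [pvScN_shift cur (x :: xs) (0 :: (pvCuts xs).map (· + 1) ++ [1 + xs.length])]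
      have hih := ih [x] (by simp)
      simp only [List.length_singleton, List.singleton_append] at hih
      rw [hih]
      simp [pvChunks, hx, List.take_left']
    · simp only [hx, Bool.false_eq_true, if_false, List.nil_append, List.map_map]
      have h1 : ((pvCuts xs).map ((· + cur.length) ∘ (· + 1)) : List Nat)
          = (pvCuts xs).map (· + (cur ++ [x]).length) := by
        apply List.map_congr_left; intro a _; simp [Function.comp_def]; omega
      have h2 : cur ++ x :: xs = (cur ++ [x]) ++ xs := by simp
      have h3 : cur.length + (x :: xs).length = (cur ++ [x]).length + xs.length := by
        simp; omega
      rw [h1, h2, h3, ih (cur ++ [x]) (by simp), pvChunks]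
      simp [hx]

theorem pvFoldA (t : List String) : ∀ (sections : List String) (cur : List String),
    cur ≠ [] →
    (let st := t.foldl (fun (st : List String × List String) line =>
        let st := if pvBoundary line then
            (if st.2 ≠ [] then (st.1 ++ [PySem.Str.join "\n" st.2], ([] : List String)) else st)
          else st
        (st.1, st.2 ++ [line])) (sections, cur)
      if st.2 ≠ [] then st.1 ++ [PySem.Str.join "\n" st.2] else st.1) =
    sections ++ (pvChunks cur t).map (PySem.Str.join "\n") := by
  induction t with
  | nil =>
    intro sections cur hcur
    simp [pvChunks, hcur]
  | cons x xs ih =>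
    intro sections cur hcur
    by_cases hx : pvBoundary x
    · simp only [List.foldl_cons, hx, if_true, ne_eq, hcur, not_false_iff, List.nil_append]
      rw [ih (sections ++ [PySem.Str.join "\n" cur]) [x] (by simp)]
      simp [pvChunks, hx]
    · simp only [List.foldl_cons, hx, Bool.false_eq_true, if_false]
      rw [ih sections (cur ++ [x]) (by simp)]
      simp [pvChunks, hx]

theorem pvGo_ne_nil (sep : List Char) : ∀ (fuel : Nat) (l cur : List Char) (acc : List (List Char)),
    PySem.Chars.splitOn.go sep fuel l cur acc ≠ [] := by
  intro fuel
  induction fuel with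
  | zero => intro l cur acc; simp [PySem.Chars.splitOn.go]
  | succ n ih =>
    intro l cur acc
    cases l with
    | nil => simp [PySem.Chars.splitOn.go]
    | cons c rest =>
      rw [PySem.Chars.splitOn.go]
      split_ifs with h
      · exact ih _ _ _
      · exact ih _ _ _

theorem pvLines_ne_nil (content : String) : (PySem.Str.split? content "\n").getD [""] ≠ [] := by
  unfold PySem.Str.split? PySem.Chars.split?
  simp [PySem.Chars.splitOn, pvGo_ne_nil]

theorem pvZipSlice (l : List String) (bs : List Nat) :
    ((bs.map (fun n : Nat => (n : Int))).zip ((bs.map (fun n : Nat => (n : Int))).tail)).map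
      (fun ab => PySem.Str.join "\n" (PySem.List.slice l (some ab.1) (some ab.2)))
      = (pvScN l bs).map (PySem.Str.join "\n") := by
  induction bs with
  | nil => simp [pvScN]
  | cons a r ih =>
    cases r with
    | nil => simp [pvScN]
    | cons b r' =>
      simp only [List.map_cons, List.tail_cons, List.zip_cons_cons, pvScN] at *
      rw [ih]
      congr 1
      rw [PySem.List.slice_natCast]

theorem pvCutsInt (h : String) (t : List String) :
    (PySem.List.pyRange 1 (((h :: t).length : Nat) : Int) 1).filter
        (fun i => pvBoundary (PySem.List.pyGetD (h :: t) i ""))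
      = ((pvCuts t).map (· + 1)).map (fun n : Nat => (n : Int)) := by
  rw [PySem.List.pyRange_one]
  have hlen : ((((h :: t).length : Nat) : Int) - 1).toNat = t.length := by
    simp
  rw [hlen, List.filter_map]
  have hpred : ∀ k : Nat, ((fun i => pvBoundary (PySem.List.pyGetD (h :: t) i "")) ∘
        (fun k : Nat => (1 : Int) + k)) k = pvBoundary (t.getD k "") := by
    intro k
    simp only [Function.comp_apply]
    have e1 : ((1 : Int) + k) = (((k + 1 : Nat) : Int)) := by push_cast; ring
    rw [e1, PySem.List.pyGetD_natCast, List.getD_cons_succ]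
  rw [List.filter_congr (fun k _ => hpred k)]
  simp only [pvCuts, List.map_map]
  apply List.map_congr_left
  intro a _
  simp [Function.comp_def]
  ring

theorem pvMain (h : String) (t : List String) :
    (let st := (h :: t).foldl (fun (st : List String × List String) line =>
        let st := if pvBoundary line then
            (if st.2 ≠ [] then (st.1 ++ [PySem.Str.join "\n" st.2], ([] : List String)) else st)
          else st
        (st.1, st.2 ++ [line])) (([], []) : List String × List String)
      if st.2 ≠ [] then st.1 ++ [PySem.Str.join "\n" st.2] else st.1)
    = (let cuts := (PySem.List.pyRange 1 ((h :: t).length) 1).filter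
          (fun i => pvBoundary (PySem.List.pyGetD (h :: t) i ""))
        let bounds := (0 : Int) :: cuts ++ [((h :: t).length : Int)]
        (bounds.zip bounds.tail).map
          (fun ab => PySem.Str.join "\n" (PySem.List.slice (h :: t) (some ab.1) (some ab.2)))) := by
  -- A side: the first iteration always yields ([], [h]); then the flush-loop invariant
  have hA : (let st := (h :: t).foldl (fun (st : List String × List String) line =>
        let st := if pvBoundary line then
            (if st.2 ≠ [] then (st.1 ++ [PySem.Str.join "\n" st.2], ([] : List String)) else st)
          else st
        (st.1, st.2 ++ [line])) (([], []) : List String × List String)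
      if st.2 ≠ [] then st.1 ++ [PySem.Str.join "\n" st.2] else st.1)
      = (pvChunks [h] t).map (PySem.Str.join "\n") := by
    have h0 := pvFoldA t [] [h] (by simp)
    simp only [List.nil_append] at h0
    rw [← h0]
    simp only [List.foldl_cons]
    by_cases hh : pvBoundary h <;> simp [hh]
  rw [hA]
  -- B side: Int bounds are the casts of the Nat bounds; then slice-at-bounds = pvChunks
  have hbounds : ((0 : Int) :: ((PySem.List.pyRange 1 ((h :: t).length) 1).filter
          (fun i => pvBoundary (PySem.List.pyGetD (h :: t) i ""))) ++ [((h :: t).length : Int)])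
      = ((0 :: (pvCuts t).map (· + 1) ++ [1 + t.length]).map (fun n : Nat => (n : Int))) := by
    rw [pvCutsInt]
    simp only [List.map_cons, List.map_append, List.map_map, List.map_nil, List.length_cons,
      Nat.cast_zero]
    congr 2
    simp; omega
  simp only [hbounds]
  rw [pvZipSlice (h :: t) (0 :: (pvCuts t).map (· + 1) ++ [1 + t.length])]
  have hcore := pvScN_core t [h] (by simp)
  simp only [List.length_singleton, List.singleton_append] at hcore
  rw [hcore]

-- ===== VERDICT (by name: the statement is the Claim_ definition above) =====
theorem split_css_sections_py_spec : Claim_equal_split_css_sections_py := by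
  intro content _
  unfold Spec_split_css_sections_py split_css_sections_py split_css_sections_py_alt
  obtain ⟨h, t, e⟩ := List.exists_cons_of_ne_nil (pvLines_ne_nil content)
  rw [e]
  exact pvMain h t
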